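-- pv_equiv track=rewrite | github.com/jfjoaofilho/INTELIGENCIA-ARTIFICIAL | algoritmo_ Hill_Clim.py | evaluate
-- ===== SOURCE A (Python) =====
-- def evaluate(state):
--   # Avalia o estado atual
--   value = 0
--
--   # Adiciona ou subtrai valor de acordo com o estado
--   for i in range(len(state)):
--     if state[i] == 0:
--       value -= 1
--     else:
--       value += 1
--   return value
-- ===== SOURCE B (Python) =====
-- def evaluate(state):
--   # Divide and conquer: score of a state is the sum of the scores of its halves;
--   # a singleton scores -1 if zero, +1 otherwise.
--   if not state:
--     return 0
--   if len(state) == 1: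
--     return -1 if state[0] == 0 else 1
--   mid = len(state) // 2
--   return evaluate(state[:mid]) + evaluate(state[mid:])
-- ===== Notes on version B (the rewrite author's own statement) =====
-- stated objective: alternative
-- what changed: Replaces A's indexed accumulator loop with a divide-and-conquer recursion: split the list in halves, score singletons directly, and add the halves' scores.
import Mathlib
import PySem

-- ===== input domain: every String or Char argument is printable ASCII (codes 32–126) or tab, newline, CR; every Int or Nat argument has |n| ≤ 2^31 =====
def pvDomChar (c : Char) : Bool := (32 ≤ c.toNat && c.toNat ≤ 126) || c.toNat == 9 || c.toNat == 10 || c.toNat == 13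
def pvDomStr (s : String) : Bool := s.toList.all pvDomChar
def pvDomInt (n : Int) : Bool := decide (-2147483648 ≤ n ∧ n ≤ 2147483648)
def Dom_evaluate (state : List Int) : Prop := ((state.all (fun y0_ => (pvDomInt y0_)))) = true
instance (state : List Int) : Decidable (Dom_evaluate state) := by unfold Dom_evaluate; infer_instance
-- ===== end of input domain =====

-- B replaces A's indexed +/-1 accumulator loop with a divide-and-conquer recursion on list halves (alternative decomposition, same result).

-- ===== PORT A =====
-- for i in range(len(state)): value -= 1 if state[i] == 0 else value += 1
def evaluate (state : List Int) : Int :=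
  (PySem.List.pyRange 0 (state.length : Int) 1).foldl
    (fun value i => if PySem.List.pyGetD state i 0 = 0 then value - 1 else value + 1) 0

-- ===== PORT B =====
-- if not state: 0; if len == 1: ±1; else evaluate(state[:mid]) + evaluate(state[mid:])
def evaluate_alt (state : List Int) : Int :=
  if state.length = 0 then 0
  else if state.length = 1 then
    (if state.headD 0 = 0 then -1 else 1)
  else
    evaluate_alt (state.take (state.length / 2)) + evaluate_alt (state.drop (state.length / 2))
termination_by state.length
decreasing_by
  · simp; omega
  · simp; omega

-- ===== PRECONDITION & SPEC =====
def Spec_evaluate (state : List Int) (out : Int) : Prop := out = evaluate_alt state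
instance (state : List Int) (out : Int) : Decidable (Spec_evaluate state out) := by unfold Spec_evaluate; infer_instance

-- ===== CLAIM (what is proved, stated in full; the proofs are below) =====
def Claim_equal_evaluate : Prop := ∀ (state : List Int), Dom_evaluate state → Spec_evaluate state (evaluate state)

-- ===== LEMMAS AND PROOFS =====
theorem evaluate_foldl (xs : List Int) (v : Int) :
    xs.foldl (fun value x => if x = 0 then value - 1 else value + 1) v
      = v + (xs.length : Int) - 2 * ((xs.countP (fun x => x = 0) : Nat) : Int) := by
  induction xs generalizing v with
  | nil => simp
  | cons x xs ih =>
    simp only [List.foldl_cons, List.countP_cons, List.length_cons, ih]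
    by_cases h : x = 0 <;> simp [h] <;> ring

theorem alt_closed (state : List Int) :
    evaluate_alt state = (state.length : Int) - 2 * ((state.countP (fun x => x = 0) : Nat) : Int) := by
  induction state using evaluate_alt.induct with
  | case1 s h =>
    rw [evaluate_alt]
    simp_all [List.length_eq_zero_iff.mp h]
  | case2 s h0 h1 hz =>
    rw [evaluate_alt]
    obtain ⟨x, hx⟩ := List.length_eq_one_iff.mp h1
    subst hx
    simp_all
  | case3 s h0 h1 hz =>
    rw [evaluate_alt]
    obtain ⟨x, hx⟩ := List.length_eq_one_iff.mp h1
    subst hx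
    simp_all
  | case4 s h0 h1 ih1 ih2 =>
    rw [evaluate_alt]
    simp only [h0, h1, if_false, ih1, ih2]
    have hcount : s.countP (fun x => x = 0)
        = (s.take (s.length / 2)).countP (fun x => x = 0)
          + (s.drop (s.length / 2)).countP (fun x => x = 0) := by
      conv_lhs => rw [← List.take_append_drop (s.length / 2) s]
      rw [List.countP_append]
    have hlen : s.length = (s.take (s.length / 2)).length + (s.drop (s.length / 2)).length := by
      simp; omega
    rw [hcount]
    push_cast
    omega

-- ===== VERDICT (by name: the statement is the Claim_ definition above) =====
theorem evaluate_spec : Claim_equal_evaluate := by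
  intro state _
  show evaluate state = evaluate_alt state
  unfold evaluate
  rw [PySem.List.foldl_pyRange_pyGetD' (f := fun value x => if x = 0 then value - 1 else value + 1)
        (xs := state) (d := 0) (init := 0) (a := 0) (by omega)]
  rw [alt_closed, evaluate_foldl]
  simp
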